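-- pv_equiv track=rewrite | github.com/rsionnach/nthlayer-observe | src/nthlayer_observe/dependencies/providers/kubernetes.py | _env_references_service
-- ===== SOURCE A (Python) =====
-- def _env_references_service(value: str, service: str) -> bool:
--     """Check if an environment variable value references a service."""
--     value_lower = value.lower()
--     service_lower = service.lower()
--
--     # Check for direct service name in URL
--     patterns = [
--         f"://{service_lower}.",
--         f"://{service_lower}:",
--         f"://{service_lower}/",
--         f"://{service_lower} ",
--     ]
--
--     for pattern in patterns:
--         if pattern in value_lower:
--             return True
--
--     # Check K8s service discovery env var format
--     service_env = service_lower.replace("-", "_")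
--     if f"{service_env}_service_host" in value_lower:
--         return True
--
--     return False
-- ===== SOURCE B (Python) =====
-- def _env_references_service(value: str, service: str) -> bool:
--     """Check if an environment variable value references a service."""
--     value_lower = value.lower()
--     service_lower = service.lower()
--
--     # One scan: every occurrence of "://<service>" followed by one of ".:/ "
--     prefix = "://" + service_lower
--     n = len(prefix)
--     for i in range(len(value_lower) - n):
--         if value_lower[i:i + n] == prefix and value_lower[i + n] in ".:/ ":
--             return True
--
--     # Check K8s service discovery env var format
--     service_env = service_lower.replace("-", "_")
--     return f"{service_env}_service_host" in value_lower
-- ===== Notes on version B (the rewrite author's own statement) =====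
-- stated objective: alternative
-- what changed: A builds four patterns ('://svc.', '://svc:', '://svc/', '://svc ') and runs four independent substring searches; B makes a single left-to-right scan over the value, testing at each index whether '://svc' starts there and the next character belongs to the set '.:/ ', then does the unchanged K8s _service_host check.
import Mathlib
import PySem

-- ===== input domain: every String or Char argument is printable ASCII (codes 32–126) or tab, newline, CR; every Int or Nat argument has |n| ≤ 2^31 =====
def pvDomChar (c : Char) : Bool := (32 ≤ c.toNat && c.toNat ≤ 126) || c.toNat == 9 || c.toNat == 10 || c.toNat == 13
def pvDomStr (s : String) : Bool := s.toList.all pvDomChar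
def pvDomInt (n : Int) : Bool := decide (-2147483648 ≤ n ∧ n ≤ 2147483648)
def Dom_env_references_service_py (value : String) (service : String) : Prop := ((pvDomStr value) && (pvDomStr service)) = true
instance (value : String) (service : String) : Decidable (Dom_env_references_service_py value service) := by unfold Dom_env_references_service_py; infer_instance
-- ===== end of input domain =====

-- B replaces A's four independent substring searches by one index scan over the value,
-- checking each occurrence of "://<service>" for a following character in ".:/ " (objective: alternative).


-- ===== PORT A =====
def env_references_service_py (value : String) (service : String) : Bool :=
  let value_lower := PySem.Str.lower value
  let service_lower := PySem.Str.lower service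
  let patterns := ["://" ++ service_lower ++ ".",
                   "://" ++ service_lower ++ ":",
                   "://" ++ service_lower ++ "/",
                   "://" ++ service_lower ++ " "]
  if patterns.any (fun p => PySem.Str.isIn p value_lower) then true
  else
    let service_env := PySem.Str.replace service_lower "-" "_"
    PySem.Str.isIn (service_env ++ "_service_host") value_lower

-- ===== PORT B =====
-- the loop 'for i in range(len(value_lower) - n)' is List.range; value_lower[i:i+n] is
-- PySem.List.slice; value_lower[i+n] is PySem.List.pyGet? (always in range here);
-- 'c in ".:/ "' on the single char is list membership (exact for 1-char needles)
def env_references_service_py_alt (value : String) (service : String) : Bool :=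
  let value_lower := PySem.Str.lower value
  let service_lower := PySem.Str.lower service
  let prefixS := "://" ++ service_lower
  let n := prefixS.toList.length
  let L := value_lower.toList
  if (List.range (L.length - n)).any (fun i =>
      decide (PySem.List.slice L (some (i : Int)) (some ((i : Int) + (n : Int))) = prefixS.toList)
      && ((PySem.List.pyGet? L ((i : Int) + (n : Int))).map
            (fun c => (".:/ ".toList).contains c)).getD false)
  then true
  else
    let service_env := PySem.Str.replace service_lower "-" "_"
    PySem.Str.isIn (service_env ++ "_service_host") value_lower

-- ===== PRECONDITION & SPEC =====
def Spec_env_references_service_py (value : String) (service : String) (out : Bool) : Prop := out = env_references_service_py_alt value service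
instance (value : String) (service : String) (out : Bool) : Decidable (Spec_env_references_service_py value service out) := by unfold Spec_env_references_service_py; infer_instance

-- ===== CLAIM (what is proved, stated in full; the proofs are below) =====
def Claim_equal_env_references_service_py : Prop := ∀ (value : String) (service : String), Dom_env_references_service_py value service → Spec_env_references_service_py value service (env_references_service_py value service)

-- ===== LEMMAS AND PROOFS =====

-- "P followed by c occurs in L" ↔ "some index i has L[i:i+|P|] = P and L[i+|P|] = c"
lemma infix_snoc_iff (L P : List Char) (c : Char) :
    (P ++ [c]) <:+: L ↔
      ∃ i, i < L.length - P.length ∧ (L.drop i).take P.length = P ∧ L[i + P.length]? = some c := by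
  constructor
  · rintro ⟨s, t, h⟩
    refine ⟨s.length, ?_, ?_, ?_⟩
    · have := congrArg List.length h
      simp at this
      omega
    · have hd : L.drop s.length = P ++ [c] ++ t := by
        subst h; simp
      rw [hd]
      rw [List.append_assoc, List.take_left]
    · have : L[s.length + P.length]? = (L.drop s.length)[P.length]? := by
        rw [List.getElem?_drop]
      rw [this]
      have hd : L.drop s.length = P ++ ([c] ++ t) := by
        subst h; simp
      rw [hd, List.getElem?_append_right (by omega)]
      simp
  · rintro ⟨i, hi, htake, hget⟩
    have h1 : (L.drop i).take (P.length + 1) = P ++ [c] := by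
      have hc : (L.drop i)[P.length]? = some c := by
        rw [List.getElem?_drop]; exact hget
      rw [List.take_add_one, htake, hc]; rfl
    have h2 : (L.drop i).take (P.length + 1) <:+: L :=
      ((L.drop i).take_prefix _).isInfix.trans (L.drop_suffix i).isInfix
    rw [h1] at h2
    exact h2

-- B's loop body, as a proposition about drop/take/getElem?
lemma body_iff (L P : List Char) (i : ℕ) :
    (decide (PySem.List.slice L (some (i : Int)) (some ((i : Int) + (P.length : Int))) = P)
      && ((PySem.List.pyGet? L ((i : Int) + (P.length : Int))).map
            (fun c => (".:/ ".toList).contains c)).getD false) = true ↔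
    ((L.drop i).take P.length = P ∧
      ∃ c, L[i + P.length]? = some c ∧ (c = '.' ∨ c = ':' ∨ c = '/' ∨ c = ' ')) := by
  rw [PySem.List.slice_natCast_add,
      show ((i:Int)+(P.length:Int)) = ((i+P.length : ℕ) : Int) by push_cast; ring,
      PySem.List.pyGet?_natCast]
  cases hL : L[i + P.length]? with
  | none => simp
  | some c =>
    show (_ && (".:/ ".toList).contains c) = true ↔ _
    rw [show ".:/ ".toList = ['.', ':', '/', ' '] from rfl]
    simp only [Bool.and_eq_true, decide_eq_true_eq, List.contains_iff_mem, List.mem_cons,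
      List.not_mem_nil, or_false]
    constructor
    · rintro ⟨ht, hm⟩; exact ⟨ht, c, rfl, hm⟩
    · rintro ⟨ht, c', hc', hm⟩
      injection hc' with h; subst h; exact ⟨ht, hm⟩

-- A's four-pattern disjunction equals B's single scan
lemma cond_eq (vl sl : String) :
    (["://" ++ sl ++ ".", "://" ++ sl ++ ":", "://" ++ sl ++ "/", "://" ++ sl ++ " "].any
        (fun p => PySem.Str.isIn p vl))
    = (List.range (vl.toList.length - ("://" ++ sl).toList.length)).any (fun i =>
        decide (PySem.List.slice vl.toList (some (i : Int))
            (some ((i : Int) + ((("://" ++ sl).toList.length : ℕ) : Int))) = ("://" ++ sl).toList)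
        && ((PySem.List.pyGet? vl.toList ((i : Int) + ((("://" ++ sl).toList.length : ℕ) : Int))).map
              (fun c => (".:/ ".toList).contains c)).getD false) := by
  rw [Bool.eq_iff_iff]
  simp only [List.any_eq_true, List.mem_range]
  constructor
  · intro h
    obtain ⟨p, hp, hin⟩ := h
    have key : ∃ c, (c = '.' ∨ c = ':' ∨ c = '/' ∨ c = ' ') ∧
        (("://" ++ sl).toList ++ [c]) <:+: vl.toList := by
      simp only [List.mem_cons, List.not_mem_nil, or_false] at hp
      rcases hp with h|h|h|h <;> subst h <;>
        [exact ⟨'.', by tauto, by simpa [String.toList_append] using (PySem.Str.isIn_iff_infix _ _).mp hin⟩;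
         exact ⟨':', by tauto, by simpa [String.toList_append] using (PySem.Str.isIn_iff_infix _ _).mp hin⟩;
         exact ⟨'/', by tauto, by simpa [String.toList_append] using (PySem.Str.isIn_iff_infix _ _).mp hin⟩;
         exact ⟨' ', by tauto, by simpa [String.toList_append] using (PySem.Str.isIn_iff_infix _ _).mp hin⟩]
    obtain ⟨c, hc, hinf⟩ := key
    obtain ⟨i, hi, htake, hget⟩ := (infix_snoc_iff _ _ _).mp hinf
    exact ⟨i, hi, (body_iff _ _ _).mpr ⟨htake, c, hget, hc⟩⟩
  · rintro ⟨i, hi, hb⟩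
    obtain ⟨htake, c, hget, hc⟩ := (body_iff _ _ _).mp hb
    have hinf : (("://" ++ sl).toList ++ [c]) <:+: vl.toList :=
      (infix_snoc_iff _ _ _).mpr ⟨i, hi, htake, hget⟩
    rcases hc with h|h|h|h <;> subst h
    · exact ⟨"://" ++ sl ++ ".", by simp, (PySem.Str.isIn_iff_infix _ _).mpr (by simpa [String.toList_append] using hinf)⟩
    · exact ⟨"://" ++ sl ++ ":", by simp, (PySem.Str.isIn_iff_infix _ _).mpr (by simpa [String.toList_append] using hinf)⟩
    · exact ⟨"://" ++ sl ++ "/", by simp, (PySem.Str.isIn_iff_infix _ _).mpr (by simpa [String.toList_append] using hinf)⟩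
    · exact ⟨"://" ++ sl ++ " ", by simp, (PySem.Str.isIn_iff_infix _ _).mpr (by simpa [String.toList_append] using hinf)⟩

theorem env_references_service_py_eq (value service : String) :
    env_references_service_py value service = env_references_service_py_alt value service := by
  simp only [env_references_service_py, env_references_service_py_alt]
  rw [cond_eq (PySem.Str.lower value) (PySem.Str.lower service)]

-- ===== VERDICT (by name: the statement is the Claim_ definition above) =====
theorem env_references_service_py_spec : Claim_equal_env_references_service_py := by
  intro value service _
  exact env_references_service_py_eq value service
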